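-- pv_equiv track=rewrite | github.com/skynowa/PyAnalyzer | v1/create-priority-list.py | parseCommitsData
-- ===== SOURCE A (Python) =====
-- from collections import defaultdict
--
-- def parseCommitsData(commits_data, files_mask):
--     commits = commits_data.split("|^|")
--
--     currently_processed_day = ""
--     counted_file_names = set()
--     files_counter = defaultdict(int)
--     for commit in commits:
--         commit_date_files = commit.split("|#|")
--         if len(commit_date_files) == 2:
--             commit_date = commit_date_files[0]
--             if currently_processed_day != commit_date:
--                 currently_processed_day = commit_date
--                 counted_file_names.clear()
--
--             commit_file_names = commit_date_files[1].split()
--             for file_name in commit_file_names: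
--                 if any(file_name.endswith(file_extension) for file_extension in files_mask):
--                     if file_name not in counted_file_names:
--                         files_counter[file_name] += 1
--                         counted_file_names.add(file_name)
--
--     return files_counter
-- ===== SOURCE B (Python) =====
-- from collections import defaultdict
--
--
-- def parseCommitsData(commits_data, files_mask):
--     # 1) parse: keep only blocks that split into exactly (date, files_str)
--     valid = []
--     for block in commits_data.split("|^|"):
--         parts = block.split("|#|")
--         if len(parts) == 2:
--             valid.append((parts[0], parts[1]))
--
--     # 2) group contiguous same-date runs
--     chunks = []
--     i = 0
--     n = len(valid)
--     while i < n:
--         date = valid[i][0]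
--         j = i + 1
--         while j < n and valid[j][0] == date:
--             j += 1
--         chunks.append(valid[i:j])
--         i = j
--
--     # 3) count: fresh "seen" set per day-run
--     counter = defaultdict(int)
--     for chunk in chunks:
--         seen = set()
--         for _, files_str in chunk:
--             for name in files_str.split():
--                 if any(name.endswith(ext) for ext in files_mask):
--                     if name not in seen:
--                         counter[name] += 1
--                         seen.add(name)
--     return counter
-- ===== Notes on version B (the rewrite author's own statement) =====
-- stated objective: alternative
-- what changed: Replaces A's single stateful pass (running current-day variable with in-place set reset) by a three-phase pipeline: parse valid (date, files) pairs, group them into contiguous same-day chunks, then count each chunk with a fresh seen-set.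
import Mathlib
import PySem

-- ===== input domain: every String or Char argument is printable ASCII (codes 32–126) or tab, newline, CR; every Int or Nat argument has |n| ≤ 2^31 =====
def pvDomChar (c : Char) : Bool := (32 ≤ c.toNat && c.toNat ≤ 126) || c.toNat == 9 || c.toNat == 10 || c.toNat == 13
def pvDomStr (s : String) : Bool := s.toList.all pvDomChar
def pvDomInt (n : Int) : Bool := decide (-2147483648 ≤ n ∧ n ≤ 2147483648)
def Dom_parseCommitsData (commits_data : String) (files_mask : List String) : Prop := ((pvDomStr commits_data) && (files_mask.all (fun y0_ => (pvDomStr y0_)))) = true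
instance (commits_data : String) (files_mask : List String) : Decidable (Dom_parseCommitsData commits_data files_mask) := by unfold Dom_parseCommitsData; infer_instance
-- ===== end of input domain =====

-- B replaces A's single stateful pass (running day + in-place set reset) by a
-- parse / group-into-contiguous-day-chunks / count-per-chunk pipeline (alternative decomposition, same cost).

-- ===== PORT A =====
-- shared inner step: one file name against (seen set, counter) — identical inner loop in both Pythons
def pvFileStep (files_mask : List String) (p : PySem.Set String × PySem.Dict String Int) (name : String) :
    PySem.Set String × PySem.Dict String Int :=
  if files_mask.any (fun ext => PySem.Str.endswith name ext) then
    if PySem.Set.contains p.1 name then p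
    else (PySem.Set.add p.1 name, p.2.modify name 0 (· + 1))
  else p

-- one commit's files string processed against (seen, counter)
def pvPairStep (files_mask : List String) (p : PySem.Set String × PySem.Dict String Int) (pr : String × String) :
    PySem.Set String × PySem.Dict String Int :=
  (PySem.Str.split₀ pr.2).foldl (pvFileStep files_mask) p

-- split a block on "|#|" and keep it only if it has exactly (date, files_str)
def pvParse (block : String) : Option (String × String) :=
  -- sep "|#|" ≠ "" so split? is always some; .getD [] is exact
  let parts := (PySem.Str.split? block "|#|").getD []
  if parts.length = 2 then some (parts.headD "", parts.getD 1 "") else none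

-- A's loop body: state (current day, seen set, counter)
def pvAStep (files_mask : List String) (st : String × PySem.Set String × PySem.Dict String Int) (commit : String) :
    String × PySem.Set String × PySem.Dict String Int :=
  match pvParse commit with
  | some pr =>
      let seen : PySem.Set String := if st.1 ≠ pr.1 then [] else st.2.1
      (pr.1, pvPairStep files_mask (seen, st.2.2) pr)
  | none => st

def parseCommitsData (commits_data : String) (files_mask : List String) : List (String × Int) :=
  ((((PySem.Str.split? commits_data "|^|").getD []).foldl (pvAStep files_mask)
      ("", ([] : PySem.Set String), (PySem.Dict.empty : PySem.Dict String Int))).2.2).items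

-- ===== PORT B =====
-- group a parsed pair list into contiguous same-date chunks (Source B's index scan = takeWhile/dropWhile)
def pvChunk : List (String × String) → List (List (String × String))
  | [] => []
  | p :: r =>
      (p :: r.takeWhile (fun q => q.1 == p.1)) :: pvChunk (r.dropWhile (fun q => q.1 == p.1))
termination_by l => l.length
decreasing_by
  exact Nat.lt_succ_of_le (List.length_dropWhile_le _ _)

-- one chunk counted with a fresh seen set
def pvChunkStep (files_mask : List String) (cnt : PySem.Dict String Int) (chunk : List (String × String)) :
    PySem.Dict String Int :=
  (chunk.foldl (pvPairStep files_mask) (([] : PySem.Set String), cnt)).2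

def parseCommitsData_alt (commits_data : String) (files_mask : List String) : List (String × Int) :=
  let valid := ((PySem.Str.split? commits_data "|^|").getD []).filterMap pvParse
  ((pvChunk valid).foldl (pvChunkStep files_mask) (PySem.Dict.empty : PySem.Dict String Int)).items

-- ===== PRECONDITION & SPEC =====
def Spec_parseCommitsData (commits_data : String) (files_mask : List String) (out : List (String × Int)) : Prop := out = parseCommitsData_alt commits_data files_mask
instance (commits_data : String) (files_mask : List String) (out : List (String × Int)) : Decidable (Spec_parseCommitsData commits_data files_mask out) := by unfold Spec_parseCommitsData; infer_instance

-- ===== CLAIM (what is proved, stated in full; the proofs are below) =====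
def Claim_equal_parseCommitsData : Prop := ∀ (commits_data : String) (files_mask : List String), Dom_parseCommitsData commits_data files_mask → Spec_parseCommitsData commits_data files_mask (parseCommitsData commits_data files_mask)

-- ===== LEMMAS AND PROOFS =====

-- A's per-valid-pair step (the some-branch of pvAStep)
def pvAPairStep (files_mask : List String) (st : String × PySem.Set String × PySem.Dict String Int) (pr : String × String) :
    String × PySem.Set String × PySem.Dict String Int :=
  (pr.1, pvPairStep files_mask ((if st.1 ≠ pr.1 then [] else st.2.1), st.2.2) pr)

theorem pvAStep_eq (fm : List String) (st : String × PySem.Set String × PySem.Dict String Int) (c : String) :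
    pvAStep fm st c = match pvParse c with
      | some pr => pvAPairStep fm st pr
      | none => st := rfl

-- Lemma 1: A's fold over raw blocks = fold of the pair step over the parsed pairs
theorem pvFoldA_filterMap (fm : List String) (commits : List String)
    (st : String × PySem.Set String × PySem.Dict String Int) :
    commits.foldl (pvAStep fm) st = (commits.filterMap pvParse).foldl (pvAPairStep fm) st := by
  induction commits generalizing st with
  | nil => rfl
  | cons c r ih =>
      simp only [List.foldl_cons, List.filterMap_cons, pvAStep_eq]
      cases pvParse c with
      | none => exact ih st
      | some pr => simp only [List.foldl_cons]; exact ih _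

-- Lemma 2: within a run of pairs all dated d, A's pair step never resets the seen set
theorem pvRun (fm : List String) (run rest : List (String × String)) (d : String)
    (p : PySem.Set String × PySem.Dict String Int) (h : ∀ q ∈ run, q.1 = d) :
    (run ++ rest).foldl (pvAPairStep fm) (d, p) =
      rest.foldl (pvAPairStep fm) (d, run.foldl (pvPairStep fm) p) := by
  induction run generalizing p with
  | nil => rfl
  | cons q r ih =>
      have hq : q.1 = d := h q (by simp)
      simp only [List.cons_append, List.foldl_cons]
      have : pvAPairStep fm (d, p) q = (d, pvPairStep fm p q) := by
        simp [pvAPairStep, hq]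
      rw [this]
      exact ih _ (fun x hx => h x (by simp [hx]))

-- Lemma 3: A's pair fold = B's chunk fold, whenever the seen set is empty or the
-- current day differs from the first pair's date
theorem pvMain (fm : List String) (pairs : List (String × String)) (d : String)
    (p : PySem.Set String × PySem.Dict String Int)
    (h : p.1 = [] ∨ ∀ q ∈ pairs.head?, d ≠ q.1) :
    (pairs.foldl (pvAPairStep fm) (d, p)).2.2 = (pvChunk pairs).foldl (pvChunkStep fm) p.2 := by
  induction hn : pairs.length using Nat.strong_induction_on generalizing pairs d p with
  | _ n ih =>
  cases pairs with
  | nil => simp [pvChunk]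
  | cons pr r =>
      have hseen : (if d ≠ pr.1 then ([] : PySem.Set String) else p.1) = [] := by
        by_cases hd : d = pr.1
        · rcases h with h | h
          · simp [hd, h]
          · exact absurd hd (h pr (by simp))
        · simp [hd]
      have hstep : pvAPairStep fm (d, p) pr = (pr.1, pvPairStep fm ([], p.2) pr) := by
        simp only [pvAPairStep, hseen]
      set run := r.takeWhile (fun q => q.1 == pr.1) with hrun
      set rest := r.dropWhile (fun q => q.1 == pr.1) with hrest
      have hsplit : r = run ++ rest := (List.takeWhile_append_dropWhile).symm
      have hrunkeys : ∀ q ∈ run, q.1 = pr.1 := by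
        intro q hq
        have := List.mem_takeWhile_imp (hrun ▸ hq)
        exact eq_of_beq this
      have hresthead : ∀ q ∈ rest.head?, pr.1 ≠ q.1 := by
        intro q hq
        have := List.head?_dropWhile_not (fun q => q.1 == pr.1) r
        rw [← hrest] at this
        rw [hq] at this
        intro he
        simp [← he] at this
      have hlen : rest.length < n := by
        subst hn
        have h1 := List.length_dropWhile_le (fun q => q.1 == pr.1) r
        rw [← hrest] at h1
        simp only [List.length_cons]
        omega
      have hchunk : pvChunk (pr :: r) = (pr :: run) :: pvChunk rest := by
        rw [pvChunk]
      calc ((pr :: r).foldl (pvAPairStep fm) (d, p)).2.2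
          = ((run ++ rest).foldl (pvAPairStep fm) (pr.1, pvPairStep fm ([], p.2) pr)).2.2 := by
            rw [List.foldl_cons, hstep, hsplit]
        _ = (rest.foldl (pvAPairStep fm) (pr.1, run.foldl (pvPairStep fm) (pvPairStep fm ([], p.2) pr))).2.2 := by
            rw [pvRun fm run rest pr.1 _ hrunkeys]
        _ = (pvChunk rest).foldl (pvChunkStep fm) (run.foldl (pvPairStep fm) (pvPairStep fm ([], p.2) pr)).2 := by
            exact ih rest.length hlen rest pr.1 _ (Or.inr hresthead) rfl
        _ = (pvChunk (pr :: r)).foldl (pvChunkStep fm) p.2 := by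
            rw [hchunk, List.foldl_cons]
            rfl

-- ===== VERDICT (by name: the statement is the Claim_ definition above) =====
theorem parseCommitsData_spec : Claim_equal_parseCommitsData := by
  intro cd fm _
  unfold Spec_parseCommitsData parseCommitsData parseCommitsData_alt
  rw [pvFoldA_filterMap]
  exact congrArg PySem.Dict.items
    (pvMain fm (((PySem.Str.split? cd "|^|").getD []).filterMap pvParse) "" ([], PySem.Dict.empty) (Or.inl rfl))
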